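-- pv_equiv track=rewrite | github.com/shameekyogi68/scriptpulse-antigravity | app/components/theme.py | apply_theme_to_css
-- ===== SOURCE A (Python) =====
-- class Theme:
--     # Core Backgrounds
--     BG_PRIMARY = "#1A1729"
--     BG_SECONDARY = "#221E34"
--     BG_CARD = "rgba(32, 29, 48, 0.65)"
--     BG_CARD_HOVER = "rgba(40, 36, 60, 0.8)"
--
--     # Text
--     TEXT_PRIMARY = "#F4F6FB"
--     TEXT_SECONDARY = "#A3A0B3"
--     TEXT_MUTED = "rgba(244, 246, 251, 0.45)"
--
--     # Accents & Brand
--     ACCENT_PRIMARY = "#6A48BB"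
--     ACCENT_SECONDARY = "#2F48B9"
--     ACCENT_WARM = "#F57946"
--     ACCENT_TEAL = "#00D2A0"
--     ACCENT_ROSE = "#D92987"
--     ACCENT_BLUE = "#8EC5E9"
--     ACCENT_PURPLE = "#A74EC6"
--
--     # Semantic
--     SEMANTIC_GOOD = "#00D2A0"
--     SEMANTIC_WARNING = "#F57946"
--     SEMANTIC_CRITICAL = "#D92987"
--     SEMANTIC_INFO = "#8EC5E9"
--
-- def apply_theme_to_css(css_string: str) -> str:
--     """Injects theme values into a CSS string."""
--     replacements = {
--         "{BG_PRIMARY}": Theme.BG_PRIMARY,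
--         "{BG_SECONDARY}": Theme.BG_SECONDARY,
--         "{BG_CARD}": Theme.BG_CARD,
--         "{BG_CARD_HOVER}": Theme.BG_CARD_HOVER,
--         "{TEXT_PRIMARY}": Theme.TEXT_PRIMARY,
--         "{TEXT_SECONDARY}": Theme.TEXT_SECONDARY,
--         "{TEXT_MUTED}": Theme.TEXT_MUTED,
--         "{ACCENT_PRIMARY}": Theme.ACCENT_PRIMARY,
--         "{ACCENT_SECONDARY}": Theme.ACCENT_SECONDARY,
--         "{ACCENT_WARM}": Theme.ACCENT_WARM,
--         "{ACCENT_TEAL}": Theme.ACCENT_TEAL,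
--         "{ACCENT_ROSE}": Theme.ACCENT_ROSE,
--         "{ACCENT_BLUE}": Theme.ACCENT_BLUE,
--         "{ACCENT_PURPLE}": Theme.ACCENT_PURPLE,
--         "{SEMANTIC_GOOD}": Theme.SEMANTIC_GOOD,
--         "{SEMANTIC_WARNING}": Theme.SEMANTIC_WARNING,
--         "{SEMANTIC_CRITICAL}": Theme.SEMANTIC_CRITICAL,
--         "{SEMANTIC_INFO}": Theme.SEMANTIC_INFO,
--     }
--     for k, v in replacements.items():
--         css_string = css_string.replace(k, v)
--     return css_string
-- ===== SOURCE B (Python) =====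
-- def apply_theme_to_css(css_string: str) -> str:
--     """Injects theme values into a CSS string (single left-to-right scan)."""
--     mapping = {
--         "BG_PRIMARY": "#1A1729",
--         "BG_SECONDARY": "#221E34",
--         "BG_CARD": "rgba(32, 29, 48, 0.65)",
--         "BG_CARD_HOVER": "rgba(40, 36, 60, 0.8)",
--         "TEXT_PRIMARY": "#F4F6FB",
--         "TEXT_SECONDARY": "#A3A0B3",
--         "TEXT_MUTED": "rgba(244, 246, 251, 0.45)",
--         "ACCENT_PRIMARY": "#6A48BB",
--         "ACCENT_SECONDARY": "#2F48B9",
--         "ACCENT_WARM": "#F57946",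
--         "ACCENT_TEAL": "#00D2A0",
--         "ACCENT_ROSE": "#D92987",
--         "ACCENT_BLUE": "#8EC5E9",
--         "ACCENT_PURPLE": "#A74EC6",
--         "SEMANTIC_GOOD": "#00D2A0",
--         "SEMANTIC_WARNING": "#F57946",
--         "SEMANTIC_CRITICAL": "#D92987",
--         "SEMANTIC_INFO": "#8EC5E9",
--     }
--     out = []
--     i = 0
--     n = len(css_string)
--     while i < n:
--         ch = css_string[i]
--         if ch == "{":
--             j = css_string.find("}", i + 1)
--             if j != -1:
--                 value = mapping.get(css_string[i + 1 : j])
--                 if value is not None: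
--                     out.append(value)
--                     i = j + 1
--                     continue
--         out.append(ch)
--         i += 1
--     return "".join(out)
-- ===== Notes on version B (the rewrite author's own statement) =====
-- stated objective: alternative
-- what changed: Replaces 18 sequential full-string replace passes (one per placeholder, each allocating a new string) with a single left-to-right scan that, at each opening brace, looks the brace-delimited name up in a dict and emits its value, joining the pieces once.
import Mathlib
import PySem

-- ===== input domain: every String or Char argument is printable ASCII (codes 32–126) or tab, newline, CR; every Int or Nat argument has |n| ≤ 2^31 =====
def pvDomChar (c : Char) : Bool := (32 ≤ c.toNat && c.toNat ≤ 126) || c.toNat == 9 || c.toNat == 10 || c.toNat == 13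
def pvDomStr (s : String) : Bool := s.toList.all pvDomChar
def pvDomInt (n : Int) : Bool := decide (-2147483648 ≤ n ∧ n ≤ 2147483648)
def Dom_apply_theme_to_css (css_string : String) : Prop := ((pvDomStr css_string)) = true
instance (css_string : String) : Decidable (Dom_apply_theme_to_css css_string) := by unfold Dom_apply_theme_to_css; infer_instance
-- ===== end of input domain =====

-- B replaces A's 18 sequential full-string replace passes by one left-to-right scan with a
-- name→value table (an alternative single-pass algorithm); same return value on every input (A is total).

-- ===== PORT A =====
-- the `replacements` dict of A (insertion order)
def pvReplacements : PySem.Dict String String := PySem.Dict.mk [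
  ("{BG_PRIMARY}", "#1A1729"), ("{BG_SECONDARY}", "#221E34"),
  ("{BG_CARD}", "rgba(32, 29, 48, 0.65)"), ("{BG_CARD_HOVER}", "rgba(40, 36, 60, 0.8)"),
  ("{TEXT_PRIMARY}", "#F4F6FB"), ("{TEXT_SECONDARY}", "#A3A0B3"),
  ("{TEXT_MUTED}", "rgba(244, 246, 251, 0.45)"), ("{ACCENT_PRIMARY}", "#6A48BB"),
  ("{ACCENT_SECONDARY}", "#2F48B9"), ("{ACCENT_WARM}", "#F57946"),
  ("{ACCENT_TEAL}", "#00D2A0"), ("{ACCENT_ROSE}", "#D92987"),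
  ("{ACCENT_BLUE}", "#8EC5E9"), ("{ACCENT_PURPLE}", "#A74EC6"),
  ("{SEMANTIC_GOOD}", "#00D2A0"), ("{SEMANTIC_WARNING}", "#F57946"),
  ("{SEMANTIC_CRITICAL}", "#D92987"), ("{SEMANTIC_INFO}", "#8EC5E9")]

-- `for k, v in replacements.items(): css_string = css_string.replace(k, v)`
def apply_theme_to_css (css_string : String) : String :=
  pvReplacements.items.foldl (fun s kv => PySem.Str.replace s kv.1 kv.2) css_string

-- ===== PORT B =====
-- Source B's `mapping` dict (names without braces)
def pvMapping : PySem.Dict String String := PySem.Dict.mk [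
  ("BG_PRIMARY", "#1A1729"), ("BG_SECONDARY", "#221E34"),
  ("BG_CARD", "rgba(32, 29, 48, 0.65)"), ("BG_CARD_HOVER", "rgba(40, 36, 60, 0.8)"),
  ("TEXT_PRIMARY", "#F4F6FB"), ("TEXT_SECONDARY", "#A3A0B3"),
  ("TEXT_MUTED", "rgba(244, 246, 251, 0.45)"), ("ACCENT_PRIMARY", "#6A48BB"),
  ("ACCENT_SECONDARY", "#2F48B9"), ("ACCENT_WARM", "#F57946"),
  ("ACCENT_TEAL", "#00D2A0"), ("ACCENT_ROSE", "#D92987"),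
  ("ACCENT_BLUE", "#8EC5E9"), ("ACCENT_PURPLE", "#A74EC6"),
  ("SEMANTIC_GOOD", "#00D2A0"), ("SEMANTIC_WARNING", "#F57946"),
  ("SEMANTIC_CRITICAL", "#D92987"), ("SEMANTIC_INFO", "#8EC5E9")]

-- Source B's while-loop scan; `css_string.find("}", i+1)` + the slice `css_string[i+1:j]` are ported
-- exactly as splitting the remainder at the first '}' (takeWhile/dropWhile); `out` accumulation and
-- the final `"".join(out)` become the returned char list.
def pvScan : List Char → List Char
  | [] => []
  | c :: rest =>
    -- `ch == "{"` and `j != -1` (a '}' exists in the remainder)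
    if c = '{' ∧ rest.dropWhile (fun x => x ≠ '}') ≠ [] then
      -- `mapping.get(css_string[i+1:j])`
      match pvMapping.get? (String.ofList (rest.takeWhile (fun x => x ≠ '}'))) with
      | some v => v.toList ++ pvScan ((rest.dropWhile (fun x => x ≠ '}')).drop 1)  -- `i = j+1`
      | none => c :: pvScan rest
    else c :: pvScan rest
termination_by l => l.length
decreasing_by
  · have h1 := List.length_dropWhile_le (fun x => x ≠ '}') rest
    simp only [List.length_drop, List.length_cons]
    omega
  · simp
  · simp

def apply_theme_to_css_alt (css_string : String) : String :=
  String.ofList (pvScan css_string.toList)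

-- ===== PRECONDITION & SPEC =====
def Spec_apply_theme_to_css (css_string : String) (out : String) : Prop := out = apply_theme_to_css_alt css_string
instance (css_string : String) (out : String) : Decidable (Spec_apply_theme_to_css css_string out) := by unfold Spec_apply_theme_to_css; infer_instance

-- ===== CLAIM (what is proved, stated in full; the proofs are below) =====
def Claim_equal_apply_theme_to_css : Prop := ∀ (css_string : String), Dom_apply_theme_to_css css_string → Spec_apply_theme_to_css css_string (apply_theme_to_css css_string)

-- ===== LEMMAS AND PROOFS =====

-- the key/value pairs of A as char lists
def pvPairs : List (List Char × List Char) := pvReplacements.items.map (fun kv => (kv.1.toList, kv.2.toList))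

def pvStep (l : List Char) (p : List Char × List Char) : List Char := PySem.Chars.replace l p.1 p.2
def pvChain (cs : List Char) : List Char := pvPairs.foldl pvStep cs

-- reference form of Python's str.replace for a nonempty pattern (positional recursion)
def pvRepl (old new : List Char) : List Char → List Char
  | [] => []
  | c :: t => if old <+: (c :: t) then new ++ pvRepl old new (t.drop (old.length - 1)) else c :: pvRepl old new t
termination_by l => l.length
decreasing_by
  all_goals simp
  all_goals omega

def pvStepR (l : List Char) (p : List Char × List Char) : List Char := pvRepl p.1 p.2 l
def pvChainR (cs : List Char) : List Char := pvPairs.foldl pvStepR cs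

-- the characters allowed in a theme name
def pvNameChar (c : Char) : Bool := ('A' ≤ c && c ≤ 'Z') || c == '_'

theorem pvRepl_nil (old new : List Char) : pvRepl old new [] = [] := by
  rw [pvRepl.eq_def]

theorem pvRepl_cons (old new : List Char) (c : Char) (t : List Char) :
    pvRepl old new (c :: t) =
      if old <+: (c :: t) then new ++ pvRepl old new (t.drop (old.length - 1))
      else c :: pvRepl old new t := by
  rw [pvRepl.eq_def]

theorem pv_go_eq (old new : List Char) (hold : old ≠ []) :
    ∀ (fuel : Nat) (l acc : List Char), l.length ≤ fuel →
      PySem.Chars.replace.go old new fuel l acc = acc.reverse ++ pvRepl old new l := by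
  intro fuel
  induction fuel with
  | zero =>
    intro l acc h
    have : l = [] := by cases l <;> simp_all
    subst this
    simp [PySem.Chars.replace.go, pvRepl_nil]
  | succ n ih =>
    intro l acc h
    match l with
    | [] => simp [PySem.Chars.replace.go, pvRepl_nil]
    | c :: t =>
      rw [PySem.Chars.replace.go]
      by_cases hp : old <+: (c :: t)
      · rw [if_pos (List.isPrefixOf_iff_prefix.mpr hp)]
        have h1 : 0 < old.length := by cases old <;> simp_all
        have hlen : ((c :: t).drop old.length).length ≤ n := by
          simp at h ⊢
          omega
        rw [ih _ _ hlen]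
        have hdrop : (c :: t).drop old.length = t.drop (old.length - 1) := by
          cases old with
          | nil => exact absurd rfl hold
          | cons o os => simp
        rw [hdrop]
        rw [pvRepl_cons, if_pos hp]
        simp
      · rw [if_neg (by simpa [List.isPrefixOf_iff_prefix] using hp)]
        have hlen : t.length ≤ n := by simp at h; omega
        rw [ih _ _ hlen]
        rw [pvRepl_cons, if_neg hp]
        simp

theorem pv_replace_eq (old new l : List Char) (hold : old ≠ []) :
    PySem.Chars.replace l old new = pvRepl old new l := by
  rw [PySem.Chars.replace, if_neg (by simpa using hold)]
  simpa using pv_go_eq old new hold l.length l [] le_rfl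

-- ---- facts about the concrete tables (checked by decide on Bool forms) ----

theorem pv_shape : ∀ p ∈ pvPairs,
    p.1 = '{' :: ((p.1.drop 1).dropLast ++ ['}']) ∧
    ∀ ch ∈ (p.1.drop 1).dropLast, pvNameChar ch = true := by
  intro p hp
  have hb : pvPairs.all (fun p => (p.1 == '{' :: ((p.1.drop 1).dropLast ++ ['}'])) &&
      (p.1.drop 1).dropLast.all pvNameChar) = true := by decide
  have := List.all_eq_true.mp hb p hp
  simp only [Bool.and_eq_true, beq_iff_eq, List.all_eq_true] at this
  exact ⟨this.1, this.2⟩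

theorem pv_head : ∀ p ∈ pvPairs, p.1.head? = some '{' := by
  intro p hp
  have hb : pvPairs.all (fun p => p.1.head? == some '{') = true := by decide
  simpa using List.all_eq_true.mp hb p hp

theorem pv_nonprefix : ∀ p ∈ pvPairs, ∀ q ∈ pvPairs, p.1 ≠ q.1 → ¬ p.1 <+: q.1 := by
  intro p hp q hq hne
  have hb : pvPairs.all (fun p => pvPairs.all (fun q => (p.1 == q.1) || !(p.1.isPrefixOf q.1))) = true := by
    decide
  have := List.all_eq_true.mp (List.all_eq_true.mp hb p hp) q hq
  simp only [Bool.or_eq_true, beq_iff_eq, Bool.not_eq_true'] at this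
  rcases this with h | h
  · exact absurd h hne
  · rw [← List.isPrefixOf_iff_prefix]
    simp [h]

theorem pv_nodup : (pvPairs.map Prod.fst).Nodup := by decide

theorem pv_val : ∀ p ∈ pvPairs,
    p.2 ≠ [] ∧ (∀ hc ∈ p.2.head?, pvNameChar hc = false ∧ hc ≠ '}') ∧ ∀ ch ∈ p.2, ch ≠ '{' := by
  intro p hp
  have hb : pvPairs.all (fun p => (!(p.2 == [])) &&
      (match p.2.head? with
       | some hc => !(pvNameChar hc) && !(hc == '}')
       | none => true) &&
      p.2.all (fun ch => !(ch == '{'))) = true := by decide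
  have := List.all_eq_true.mp hb p hp
  simp only [Bool.and_eq_true, Bool.not_eq_true', beq_eq_false_iff_ne, List.all_eq_true] at this
  refine ⟨this.1.1, ?_, fun ch h => this.2 ch h⟩
  intro hc hhc
  have h2 := this.1.2
  rw [Option.mem_def.mp hhc] at h2
  simp only [Bool.and_eq_true, Bool.not_eq_true', beq_eq_false_iff_ne] at h2
  exact h2

theorem pv_lookup : ∀ p ∈ pvPairs,
    (pvMapping.get? (String.ofList ((p.1.drop 1).dropLast))).map String.toList = some p.2 := by
  intro p hp
  have hb : pvPairs.all (fun p =>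
      (pvMapping.get? (String.ofList ((p.1.drop 1).dropLast))).map String.toList == some p.2) = true := by
    decide
  simpa using List.all_eq_true.mp hb p hp

theorem pv_keys : ∀ s ∈ pvMapping.keys, ('{' :: (s.toList ++ ['}'])) ∈ pvPairs.map Prod.fst := by
  intro s hs
  have hb : pvMapping.keys.all
      (fun s => (pvPairs.map Prod.fst).contains ('{' :: (s.toList ++ ['}']))) = true := by decide
  exact List.mem_of_elem_eq_true (List.all_eq_true.mp hb s hs)

theorem pvNameChar_ne {c : Char} (h : pvNameChar c = true) : c ≠ '}' ∧ c ≠ '{' := by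
  constructor <;> rintro rfl <;> simp [pvNameChar] at h

-- ---- structural lemmas about pvRepl ----

theorem pv_prefix_cons {old : List Char} {c : Char} {u : List Char} (h : old <+: c :: u)
    (hne : old ≠ []) : ∃ old', old = c :: old' := by
  cases old with
  | nil => exact absurd rfl hne
  | cons o os =>
    obtain ⟨rfl, -⟩ := List.cons_prefix_cons.mp h
    exact ⟨os, rfl⟩

theorem pvRepl_slide (old new : List Char) (hh : old.head? = some '{') :
    ∀ (z w : List Char), (∀ ch ∈ z, ch ≠ '{') →
      pvRepl old new (z ++ w) = z ++ pvRepl old new w := by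
  intro z
  induction z with
  | nil => simp
  | cons c z' ih =>
    intro w hz
    have hne : old ≠ [] := by cases old <;> simp_all
    have hnp : ¬ old <+: (c :: (z' ++ w)) := by
      intro hp
      obtain ⟨old', rfl⟩ := pv_prefix_cons hp hne
      simp at hh
      exact hz c (by simp) hh
    rw [List.cons_append, pvRepl_cons, if_neg hnp, ih w (fun ch h => hz ch (by simp [h]))]
    simp

theorem pvRepl_key_self (old new u : List Char) (hold : old ≠ []) :
    pvRepl old new (old ++ u) = new ++ pvRepl old new u := by
  cases old with
  | nil => exact absurd rfl hold
  | cons o os =>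
    rw [List.cons_append, pvRepl_cons, if_pos (by exact ⟨u, by simp⟩)]
    simp

theorem pvRepl_prefix_inv (old new : List Char)
    (hv : ∀ hc ∈ new.head?, pvNameChar hc = false ∧ hc ≠ '}') (hvne : new ≠ []) :
    ∀ (n : Nat) (u x : List Char), u.length ≤ n → x ≠ [] →
      (∀ ch ∈ x, pvNameChar ch = true ∨ ch = '}') →
      x <+: pvRepl old new u → x <+: u := by
  intro n
  induction n with
  | zero =>
    intro u x hu hx _ hp
    have : u = [] := by cases u <;> simp_all
    subst this
    rw [pvRepl_nil] at hp
    exact absurd (List.prefix_nil.mp hp) hx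
  | succ n ih =>
    intro u x hu hx hshape hp
    match u with
    | [] =>
      rw [pvRepl_nil] at hp
      exact absurd (List.prefix_nil.mp hp) hx
    | c :: t =>
      rw [pvRepl_cons] at hp
      by_cases hpre : old <+: (c :: t)
      · rw [if_pos hpre] at hp
        cases hnew : new with
        | nil => exact absurd hnew hvne
        | cons nc ns =>
          subst hnew
          obtain ⟨x', rfl⟩ := pv_prefix_cons hp hx
          have := hv nc (by simp)
          rcases hshape nc (by simp) with h | h
          · simp [this.1] at h
          · exact absurd h this.2
      · rw [if_neg hpre] at hp
        obtain ⟨x', rfl⟩ := pv_prefix_cons hp hx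
        have hx' : x' <+: pvRepl old new t := (List.cons_prefix_cons.mp hp).2
        cases hx'e : x' with
        | nil => simp
        | cons a b =>
          subst hx'e
          have : (a :: b) <+: t := by
            apply ih t _ (by simp at hu; omega) (by simp)
              (fun ch h => hshape ch (by simp [h])) hx'
          exact List.cons_prefix_cons.mpr ⟨rfl, this⟩

-- ---- fold lemmas over the pair list ----

theorem pv_fold_nil : ∀ (P : List (List Char × List Char)), (∀ p ∈ P, p ∈ pvPairs) →
    P.foldl pvStepR [] = [] := by
  intro P
  induction P with
  | nil => simp
  | cons p P' ih =>
    intro h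
    simp only [List.foldl_cons, pvStepR, pvRepl_nil]
    exact ih (fun q hq => h q (by simp [hq]))

theorem pv_fold_cons_slide (c : Char) (hc : c ≠ '{') :
    ∀ (P : List (List Char × List Char)), (∀ p ∈ P, p ∈ pvPairs) → ∀ t,
      P.foldl pvStepR (c :: t) = c :: P.foldl pvStepR t := by
  intro P
  induction P with
  | nil => simp
  | cons p P' ih =>
    intro h t
    have hh := pv_head p (h p (by simp))
    have hne : p.1 ≠ [] := by cases hp : p.1 <;> simp_all
    have hnp : ¬ p.1 <+: (c :: t) := by
      intro hp
      obtain ⟨old', he⟩ := pv_prefix_cons hp hne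
      rw [he] at hh
      simp at hh
      exact hc hh
    simp only [List.foldl_cons, pvStepR, pvRepl_cons, if_neg hnp]
    exact ih (fun q hq => h q (by simp [hq])) (pvRepl p.1 p.2 t)

theorem pv_fold_slide_val (z : List Char) (hz : ∀ ch ∈ z, ch ≠ '{') :
    ∀ (P : List (List Char × List Char)), (∀ p ∈ P, p ∈ pvPairs) → ∀ w,
      P.foldl pvStepR (z ++ w) = z ++ P.foldl pvStepR w := by
  intro P
  induction P with
  | nil => simp
  | cons p P' ih =>
    intro h w
    simp only [List.foldl_cons, pvStepR]
    rw [pvRepl_slide p.1 p.2 (pv_head p (h p (by simp))) z w hz]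
    exact ih (fun q hq => h q (by simp [hq])) _

theorem pv_fold_slide_key (pm : List Char × List Char) (hpm : pm ∈ pvPairs) :
    ∀ (P : List (List Char × List Char)), (∀ p ∈ P, p ∈ pvPairs ∧ p.1 ≠ pm.1) → ∀ w,
      P.foldl pvStepR (pm.1 ++ w) = pm.1 ++ P.foldl pvStepR w := by
  intro P
  induction P with
  | nil => simp
  | cons p P' ih =>
    intro h w
    obtain ⟨hpP, hpne⟩ := h p (by simp)
    have hnp : ¬ p.1 <+: (pm.1 ++ w) := by
      intro hp
      rcases List.prefix_or_prefix_of_prefix hp (List.prefix_append pm.1 w) with h1 | h1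
      · exact pv_nonprefix p hpP pm hpm hpne h1
      · exact pv_nonprefix pm hpm p hpP (fun he => hpne he.symm) h1
    have hsh := pv_shape pm hpm
    have hstep : pvRepl p.1 p.2 (pm.1 ++ w) = pm.1 ++ pvRepl p.1 p.2 w := by
      conv_lhs => rw [hsh.1, List.cons_append]
      rw [pvRepl_cons, if_neg (by rw [← List.cons_append, ← hsh.1]; exact hnp)]
      rw [pvRepl_slide p.1 p.2 (pv_head p hpP) _ w ?_]
      · conv_rhs => rw [hsh.1]
        simp
      · intro ch hch
        rcases List.mem_append.mp hch with h1 | h1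
        · exact (pvNameChar_ne (hsh.2 ch h1)).2
        · simp at h1
          subst h1
          decide
    simp only [List.foldl_cons, pvStepR, hstep]
    exact ih (fun q hq => h q (by simp [hq])) _

theorem pv_chainR_key (pm : List Char × List Char) (hpm : pm ∈ pvPairs) (u : List Char) :
    pvChainR (pm.1 ++ u) = pm.2 ++ pvChainR u := by
  obtain ⟨P₁, P₂, hsplit⟩ := List.append_of_mem hpm
  have hnd := pv_nodup
  rw [hsplit, List.map_append, List.map_cons, List.nodup_append] at hnd
  have hnotm : pm.1 ∉ P₁.map Prod.fst := fun hmem => hnd.2.2 pm.1 hmem pm.1 (by simp) rfl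
  have hP₁ : ∀ p ∈ P₁, p ∈ pvPairs ∧ p.1 ≠ pm.1 := by
    intro p hp
    refine ⟨by rw [hsplit]; simp [hp], fun he => hnotm ?_⟩
    rw [← he]
    exact List.mem_map_of_mem hp
  have hP₂ : ∀ p ∈ P₂, p ∈ pvPairs := by
    intro p hp
    rw [hsplit]
    simp [hp]
  have hne : pm.1 ≠ [] := by
    have := pv_head pm hpm
    cases h : pm.1 <;> simp_all
  have hbr : ∀ ch ∈ pm.2, ch ≠ '{' := (pv_val pm hpm).2.2
  unfold pvChainR
  rw [hsplit, List.foldl_append, List.foldl_cons, List.foldl_append, List.foldl_cons]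
  rw [pv_fold_slide_key pm hpm P₁ hP₁ u]
  have hstep : pvStepR (pm.1 ++ List.foldl pvStepR u P₁) pm
      = pm.2 ++ pvStepR (List.foldl pvStepR u P₁) pm := by
    simp only [pvStepR]
    exact pvRepl_key_self pm.1 pm.2 _ hne
  rw [hstep, pv_fold_slide_val pm.2 hbr P₂ hP₂]

theorem pv_fold_nokey :
    ∀ (P : List (List Char × List Char)), (∀ p ∈ P, p ∈ pvPairs) → ∀ t,
      (∀ p ∈ pvPairs, ¬ p.1 <+: ('{' :: t)) →
      P.foldl pvStepR ('{' :: t) = '{' :: P.foldl pvStepR t := by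
  intro P
  induction P with
  | nil => simp
  | cons p P' ih =>
    intro h t hno
    have hpP := h p (by simp)
    have hstep : pvStepR ('{' :: t) p = '{' :: pvRepl p.1 p.2 t := by
      simp only [pvStepR]
      rw [pvRepl_cons, if_neg (hno p hpP)]
    have hval := pv_val p hpP
    have hno' : ∀ q ∈ pvPairs, ¬ q.1 <+: ('{' :: pvRepl p.1 p.2 t) := by
      intro q hq hpre
      have hsh := pv_shape q hq
      rw [hsh.1] at hpre
      have hpre' : ((q.1.drop 1).dropLast ++ ['}']) <+: pvRepl p.1 p.2 t :=
        (List.cons_prefix_cons.mp hpre).2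
      have hsub : ((q.1.drop 1).dropLast ++ ['}']) <+: t := by
        apply pvRepl_prefix_inv p.1 p.2 hval.2.1 hval.1 t.length t _ le_rfl (by simp) ?_ hpre'
        intro ch hch
        rcases List.mem_append.mp hch with h1 | h1
        · exact Or.inl (hsh.2 ch h1)
        · simp at h1
          exact Or.inr h1
      apply hno q hq
      rw [hsh.1]
      exact List.cons_prefix_cons.mpr ⟨rfl, hsub⟩
    simp only [List.foldl_cons]
    rw [hstep]
    exact ih (fun q hq => h q (by simp [hq])) (pvRepl p.1 p.2 t) hno'

theorem pvScan_nil : pvScan [] = [] := by rw [pvScan.eq_def]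

theorem pvScan_cons (c : Char) (t : List Char) (hc : c ≠ '{') :
    pvScan (c :: t) = c :: pvScan t := by
  rw [pvScan.eq_def]
  simp [hc]

theorem pv_takeWhile_name (nm u : List Char) (h : ∀ c ∈ nm, c ≠ '}') :
    (nm ++ '}' :: u).takeWhile (fun x => x ≠ '}') = nm ∧
    (nm ++ '}' :: u).dropWhile (fun x => x ≠ '}') = '}' :: u := by
  induction nm with
  | nil => simp
  | cons c nm' ih =>
    have hc := h c (by simp)
    have ih' := ih (fun d hd => h d (by simp [hd]))
    constructor
    · rw [List.cons_append, List.takeWhile_cons, if_pos (by simp [hc]), ih'.1]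
    · rw [List.cons_append, List.dropWhile_cons, if_pos (by simp [hc])]
      exact ih'.2

theorem pvScan_key (pm : List Char × List Char) (hpm : pm ∈ pvPairs) (u : List Char) :
    pvScan (pm.1 ++ u) = pm.2 ++ pvScan u := by
  have hsh := pv_shape pm hpm
  have htw := pv_takeWhile_name ((pm.1.drop 1).dropLast) u
    (fun c hc => (pvNameChar_ne (hsh.2 c hc)).1)
  have hlook := pv_lookup pm hpm
  obtain ⟨v, hv, hvt⟩ := Option.map_eq_some_iff.mp hlook
  conv_lhs => rw [hsh.1, List.cons_append, List.append_assoc, List.singleton_append]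
  rw [pvScan.eq_def]
  show (if '{' = '{' ∧ ((pm.1.drop 1).dropLast ++ '}' :: u).dropWhile (fun x => x ≠ '}') ≠ [] then
      match pvMapping.get? (String.ofList (((pm.1.drop 1).dropLast ++ '}' :: u).takeWhile (fun x => x ≠ '}'))) with
      | some v => v.toList ++ pvScan ((((pm.1.drop 1).dropLast ++ '}' :: u).dropWhile (fun x => x ≠ '}')).drop 1)
      | none => '{' :: pvScan ((pm.1.drop 1).dropLast ++ '}' :: u)
      else '{' :: pvScan ((pm.1.drop 1).dropLast ++ '}' :: u)) = pm.2 ++ pvScan u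
  rw [if_pos ⟨rfl, by rw [htw.2]; simp⟩, htw.1, hv, htw.2]
  show v.toList ++ pvScan (List.drop 1 ('}' :: u)) = pm.2 ++ pvScan u
  rw [hvt]
  rfl

theorem pvScan_nokey (t : List Char) (h : ∀ p ∈ pvPairs, ¬ p.1 <+: ('{' :: t)) :
    pvScan ('{' :: t) = '{' :: pvScan t := by
  rw [pvScan.eq_def]
  show (if '{' = '{' ∧ t.dropWhile (fun x => x ≠ '}') ≠ [] then
      match pvMapping.get? (String.ofList (t.takeWhile (fun x => x ≠ '}'))) with
      | some v => v.toList ++ pvScan ((t.dropWhile (fun x => x ≠ '}')).drop 1)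
      | none => '{' :: pvScan t
      else '{' :: pvScan t) = '{' :: pvScan t
  by_cases hdw : t.dropWhile (fun x => decide (x ≠ '}')) = []
  · rw [if_neg (fun hcon => hcon.2 hdw)]
  · rw [if_pos ⟨rfl, hdw⟩]
    cases hg : pvMapping.get? (String.ofList (t.takeWhile (fun x => x ≠ '}'))) with
    | none => rfl
    | some v =>
      exfalso
      obtain ⟨l, hl⟩ : ∃ l, t.dropWhile (fun x => decide (x ≠ '}')) = '}' :: l := by
        cases hdw2 : t.dropWhile (fun x => decide (x ≠ '}')) with
        | nil => exact absurd hdw2 hdw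
        | cons c l =>
          have hhd := List.head?_dropWhile_not (p := fun x => decide (x ≠ '}')) (l := t)
          rw [hdw2] at hhd
          simp at hhd
          exact ⟨l, by rw [hhd]⟩
      have hmem : String.ofList (t.takeWhile (fun x => x ≠ '}')) ∈ pvMapping.keys := by
        by_contra hnm
        rw [(PySem.Dict.get?_eq_none_iff_not_mem_keys pvMapping _).mpr hnm] at hg
        simp at hg
      have hk := pv_keys _ hmem
      rw [String.toList_ofList] at hk
      obtain ⟨p, hp, hp1⟩ := List.mem_map.mp hk
      apply h p hp
      rw [hp1]
      refine ⟨l, ?_⟩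
      have ht : t.takeWhile (fun x => decide (x ≠ '}')) ++ '}' :: l = t := by
        rw [← hl]
        exact List.takeWhile_append_dropWhile
      conv_rhs => rw [← ht]
      simp

theorem pv_chainR_eq_scan : ∀ cs, pvChainR cs = pvScan cs := by
  suffices H : ∀ n cs, cs.length ≤ n → pvChainR cs = pvScan cs from
    fun cs => H cs.length cs le_rfl
  intro n
  induction n with
  | zero =>
    intro cs hcs
    have : cs = [] := by cases cs <;> simp_all
    subst this
    rw [pvScan_nil]
    exact pv_fold_nil pvPairs (fun p hp => hp)
  | succ n ih =>
    intro cs hcs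
    match cs with
    | [] =>
      rw [pvScan_nil]
      exact pv_fold_nil pvPairs (fun p hp => hp)
    | c :: t =>
      by_cases hc : c = '{'
      · subst hc
        by_cases hm : ∃ p ∈ pvPairs, p.1 <+: ('{' :: t)
        · obtain ⟨p, hp, u, hu⟩ := hm
          rw [← hu, pv_chainR_key p hp u, pvScan_key p hp u]
          congr 1
          apply ih
          have hne : p.1 ≠ [] := by
            have := pv_head p hp
            cases h : p.1 <;> simp_all
          have hlen : p.1.length + u.length = t.length + 1 := by
            rw [← List.length_append, hu]
            simp
          have : 0 < p.1.length := List.length_pos_iff.mpr hne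
          simp at hcs
          omega
        · rw [not_exists] at hm
          have hm : ∀ p ∈ pvPairs, ¬ p.1 <+: ('{' :: t) := fun p hp => by
            have := hm p
            rw [not_and] at this
            exact this hp
          show List.foldl pvStepR ('{' :: t) pvPairs = _
          rw [pv_fold_nokey pvPairs (fun p hp => hp) t hm, pvScan_nokey t hm]
          congr 1
          apply ih
          simp at hcs
          omega
      · rw [pvScan_cons c t hc]
        show List.foldl pvStepR (c :: t) pvPairs = _
        rw [pv_fold_cons_slide c hc pvPairs (fun p hp => hp) t]
        congr 1
        apply ih
        simp at hcs
        omega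

theorem pv_A_eq (s : String) : apply_theme_to_css s = String.ofList (pvChain s.toList) := by
  simp only [apply_theme_to_css, pvChain, pvPairs, pvReplacements,
    List.map, List.foldl, PySem.Str.replace, String.toList_ofList, pvStep]

theorem pv_chain_eq_chainR (cs : List Char) : pvChain cs = pvChainR cs := by
  apply PySem.List.foldl_congr_mem
  intro acc p hp
  have hne : p.1 ≠ [] := by
    have := pv_head p hp
    cases h : p.1 <;> simp_all
  simp only [pvStep, pvStepR]
  exact pv_replace_eq p.1 p.2 acc hne

-- ===== VERDICT (by name: the statement is the Claim_ definition above) =====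
theorem apply_theme_to_css_spec : Claim_equal_apply_theme_to_css := by
  intro s _
  unfold Spec_apply_theme_to_css apply_theme_to_css_alt
  rw [pv_A_eq, pv_chain_eq_chainR, pv_chainR_eq_scan]
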